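-- pv_equiv track=rewrite | github.com/GontarRV/Python | tasks28/TransformTransform.py | Transform
-- ===== SOURCE A (Python) =====
-- from typing import List
--
-- def Transform(A: List[int]) -> List[int]:
--
--     B = []
--     for i in range(len(A)):
--         for j in range(len(A) - i):
--             k = i + j
--             max_num = max(A[j:k + 1])
--             B.append(max_num)
--     return B
-- ===== SOURCE B (Python) =====
-- from typing import List
--
-- def Transform(A: List[int]) -> List[int]:
--     # DP / sliding extension: the maxima of windows of length L+1 are obtained
--     # by combining the maxima of windows of length L with the element entering
--     # on the right: cur[j] = max(prev[j], A[j+L]).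
--     prev = list(A)
--     out = list(A)
--     for L in range(1, len(A)):
--         prev = [max(p, x) for p, x in zip(prev, A[L:])]
--         out += prev
--     return out
-- ===== Notes on version B (the rewrite author's own statement) =====
-- stated objective: faster
-- what changed: Replaces the recomputation of max(A[j:k+1]) for every window (a scan per window, O(n^3)) by a dynamic program that extends the length-L window maxima to length L+1 with one max per window (cur[j] = max(prev[j], A[j+L])), O(n^2) total.
import Mathlib
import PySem

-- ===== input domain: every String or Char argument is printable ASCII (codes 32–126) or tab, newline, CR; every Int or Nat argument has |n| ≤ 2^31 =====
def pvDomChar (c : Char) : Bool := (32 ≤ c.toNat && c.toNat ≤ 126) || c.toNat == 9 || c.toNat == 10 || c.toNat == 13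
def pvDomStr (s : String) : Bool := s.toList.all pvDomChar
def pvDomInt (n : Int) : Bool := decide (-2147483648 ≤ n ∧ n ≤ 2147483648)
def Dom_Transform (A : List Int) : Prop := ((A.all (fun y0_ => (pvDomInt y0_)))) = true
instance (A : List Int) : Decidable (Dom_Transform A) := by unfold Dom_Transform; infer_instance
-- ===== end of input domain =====

-- B replaces A's per-window rescan (O(n^3)) by a DP that extends window maxima by one element (O(n^2)); exact same output.


-- ===== PORT A =====
-- literal transliteration: for i in range(n): for j in range(n-i): B.append(max(A[j:i+j+1]))
-- (the slice is always nonempty, so Python's max never raises; the none branch is unreachable)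
def Transform (A : List Int) : List Int :=
  (PySem.List.pyRange 0 (A.length : Int) 1).foldl (fun B i =>
    (PySem.List.pyRange 0 ((A.length : Int) - i) 1).foldl (fun B j =>
      let k := i + j
      match PySem.List.max? (PySem.List.slice A (some j) (some (k + 1))) (fun y => y) with
      | some m => B ++ [m]
      | none => B) B) []

-- ===== PORT B =====
-- transliteration of Source B: prev = A; out = A; for L in 1..n-1: prev = zipWith max prev A[L:]; out += prev
def Transform_alt (A : List Int) : List Int :=
  ((PySem.List.pyRange 1 (A.length : Int) 1).foldl
    (fun (st : List Int × List Int) L =>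
      let cur := List.zipWith max st.1 (PySem.List.slice A (some L) none)
      (cur, st.2 ++ cur)) (A, A)).2

-- ===== PRECONDITION & SPEC =====
def Spec_Transform (A : List Int) (out : List Int) : Prop := out = Transform_alt A
instance (A : List Int) (out : List Int) : Decidable (Spec_Transform A out) := by unfold Spec_Transform; infer_instance

-- ===== CLAIM (what is proved, stated in full; the proofs are below) =====
def Claim_equal_Transform : Prop := ∀ (A : List Int), Dom_Transform A → Spec_Transform A (Transform A)

-- ===== LEMMAS AND PROOFS =====

-- maxima of all windows of length i+1, left to right
def win (A : List Int) : Nat → List Int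
  | 0 => A
  | i + 1 => List.zipWith max (win A i) (A.drop (i + 1))

-- max of a nonempty list as Python's max computes it (junk 0 on [])
def listMax : List Int → Int
  | [] => 0
  | x :: t => t.foldl max x

lemma win_length (A : List Int) (i : Nat) : (win A i).length = A.length - i := by
  induction i with
  | zero => simp [win]
  | succ i ih => simp [win, ih]; omega

lemma listMax_append (xs : List Int) (y : Int) (h : xs ≠ []) :
    listMax (xs ++ [y]) = max (listMax xs) y := by
  cases xs with
  | nil => exact absurd rfl h
  | cons x t => simp [listMax, List.foldl_append]

lemma max?_eq_listMax (l : List Int) (h : l ≠ []) :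
    PySem.List.max? l (fun y => y) = some (listMax l) := by
  cases l with
  | nil => exact absurd rfl h
  | cons x t => rw [PySem.List.max?_id_cons]; rfl

lemma win_getElem (A : List Int) (i j : Nat) (h : j + i < A.length)
    (h' : j < (win A i).length) :
    (win A i)[j] = listMax ((A.drop j).take (i + 1)) := by
  induction i generalizing j with
  | zero =>
    have hj : j < A.length := by omega
    have : (A.drop j).take 1 = [A[j]] := by
      rw [List.take_one, List.head?_drop]
      simp [List.getElem?_eq_getElem hj]
    simp [win, this, listMax]
  | succ i ih =>
    have hj : j + i < A.length := by omega
    have hlen : j < (win A i).length := by rw [win_length]; omega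
    have hd : j < (A.drop (i + 1)).length := by simp; omega
    have hidx : j + i < A.length := hj
    simp only [win, List.getElem_zipWith]
    rw [ih j hj hlen]
    have hgd : (A.drop (i+1))[j] = A[i + 1 + j]'(by omega) := by
      rw [List.getElem_drop]
    have htake : (A.drop j).take (i + 1 + 1) = (A.drop j).take (i + 1) ++ [A[i + 1 + j]'(by omega)] := by
      rw [List.take_add_one]
      congr 1
      have : (A.drop j)[i + 1]? = some (A[i + 1 + j]'(by omega)) := by
        rw [List.getElem?_drop, show j + (i + 1) = i + 1 + j from by omega]
        exact List.getElem?_eq_getElem (by omega)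
      simp [this]
    have hne : (A.drop j).take (i + 1) ≠ [] := by
      simp [List.take_eq_nil_iff, List.drop_eq_nil_iff]
      omega
    rw [htake, listMax_append _ _ hne, hgd]

-- the inner loop of A computes the window maxima of length i+1
lemma inner_eq (A : List Int) (i : Nat) (hi : i < A.length) (B0 : List Int) :
    (PySem.List.pyRange 0 ((A.length : Int) - (i : Int)) 1).foldl
      (fun B j =>
        let k := (i : Int) + j
        match PySem.List.max? (PySem.List.slice A (some j) (some (k + 1))) (fun y => y) with
        | some m => B ++ [m]
        | none => B) B0
    = B0 ++ win A i := by
  rw [PySem.List.foldl_congr_mem _ _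
      (fun B (j : Int) => B ++ [listMax ((A.drop j.toNat).take (i + 1))]) _ ?_]
  · rw [PySem.List.foldl_append_singleton_eq_map]
    congr 1
    apply List.ext_getElem
    · simp [PySem.List.length_pyRange_one, win_length]
    · intro k hk1 hk2
      have hk : k + i < A.length := by
        simp [PySem.List.length_pyRange_one] at hk1
        omega
      rw [List.getElem_map, PySem.List.getElem_pyRange_one]
      rw [win_getElem A i k hk (by rwa [win_length] at hk2 ⊢)]
      norm_num
  · intro B j hj
    rw [PySem.List.mem_pyRange_one] at hj
    obtain ⟨hj0, hjn⟩ := hj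
    obtain ⟨jn, rfl⟩ : ∃ jn : Nat, j = (jn : Int) := ⟨j.toNat, (Int.toNat_of_nonneg hj0).symm⟩
    have hcast : (i : Int) + (jn : Int) + 1 = ((i + jn + 1 : Nat) : Int) := by push_cast; ring
    have hslice : PySem.List.slice A (some (jn : Int)) (some ((i : Int) + (jn : Int) + 1))
        = (A.drop jn).take (i + 1) := by
      rw [hcast, PySem.List.slice_natCast]
      congr 1
      omega
    have hne : (A.drop jn).take (i + 1) ≠ [] := by
      simp [List.take_eq_nil_iff, List.drop_eq_nil_iff]
      omega
    simp only [hslice, max?_eq_listMax _ hne, Int.toNat_natCast]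

-- the A-side result, characterised
lemma transform_eq_flatMap (A : List Int) :
    Transform A = (List.range A.length).flatMap (win A) := by
  unfold Transform
  rw [PySem.List.foldl_congr_mem _ _
      (fun B (i : Int) => B ++ win A i.toNat) _ ?_]
  · rw [PySem.List.foldl_append_eq_flatMap, PySem.List.pyRange_zero_natCast,
        List.flatMap_map]
    simp
  · intro B i hi
    rw [PySem.List.mem_pyRange_one] at hi
    obtain ⟨hi0, hin⟩ := hi
    have hieq : i = (i.toNat : Int) := (Int.toNat_of_nonneg hi0).symm
    have hilt : i.toNat < A.length := by omega
    have := inner_eq A i.toNat hilt B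
    rw [hieq]
    exact this

-- the B-side loop invariant
lemma alt_loop (A : List Int) (m : Nat) :
    ∀ (i : Nat) (out : List Int), 1 ≤ i → m = A.length - i →
    ((PySem.List.pyRange (i : Int) (A.length : Int) 1).foldl
      (fun (st : List Int × List Int) L =>
        let cur := List.zipWith max st.1 (PySem.List.slice A (some L) none)
        (cur, st.2 ++ cur)) (win A (i - 1), out)).2
    = out ++ (List.range m).flatMap (fun d => win A (i + d)) := by
  induction m with
  | zero =>
    intro i out hi hm
    rw [PySem.List.pyRange_one_eq_nil (by omega : (A.length : Int) ≤ (i : Int))]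
    simp
  | succ m ih =>
    intro i out hi hm
    obtain ⟨i', rfl⟩ : ∃ i', i = i' + 1 := ⟨i - 1, by omega⟩
    have hin : i' + 1 < A.length := by omega
    rw [PySem.List.pyRange_one_cons (by exact_mod_cast hin)]
    simp only [List.foldl_cons, Nat.add_sub_cancel]
    have hcur : List.zipWith max (win A i') (PySem.List.slice A (some ((i' + 1 : Nat) : Int)) none)
        = win A (i' + 1) := by
      rw [PySem.List.slice_from_natCast]
      rfl
    have hcast : ((i' + 1 : Nat) : Int) + 1 = ((i' + 1 + 1 : Nat) : Int) := by push_cast; ring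
    rw [hcast]
    have := ih (i' + 1 + 1) (out ++ List.zipWith max (win A i')
      (PySem.List.slice A (some ((i' + 1 : Nat) : Int)) none)) (by omega) (by omega)
    simp only [Nat.add_sub_cancel] at this
    rw [hcur] at this ⊢
    rw [this]
    rw [List.range_succ_eq_map, List.flatMap_cons, List.flatMap_map]
    simp only [List.append_assoc, Nat.add_zero]
    have harith : (fun d => win A (i' + 1 + 1 + d)) = (fun d : Nat => win A (i' + 1 + d.succ)) := by
      funext d
      congr 1
      omega
    rw [harith]

lemma alt_eq_flatMap (A : List Int) :
    Transform_alt A = (List.range A.length).flatMap (win A) := by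
  unfold Transform_alt
  cases hn : A.length with
  | zero =>
    rw [PySem.List.pyRange_one_eq_nil (by norm_num : ((0 : Nat) : Int) ≤ 1)]
    simpa using List.length_eq_zero_iff.mp hn
  | succ m =>
    have := alt_loop A m 1 A (by omega) (by omega)
    rw [hn] at this
    simp only [Nat.cast_one, Nat.sub_self] at this
    simp only [show win A 0 = A from rfl] at this
    rw [this]
    rw [List.range_succ_eq_map, List.flatMap_cons, List.flatMap_map]
    simp only [show win A 0 = A from rfl]
    have harith : (fun d => win A (1 + d)) = (fun d : Nat => win A d.succ) := by
      funext d
      congr 1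
      omega
    rw [harith]

-- ===== VERDICT (by name: the statement is the Claim_ definition above) =====
theorem Transform_spec : Claim_equal_Transform := by
  intro A _
  unfold Spec_Transform
  rw [transform_eq_flatMap, alt_eq_flatMap]
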